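-- pv_equiv track=rewrite | github.com/marauder-quant/DeepVibe-AI-Hedge-Fund | src/deepvibe_hedge/ohlcv_live_append.py | summarize_append_status
-- ===== SOURCE A (Python) =====
-- def summarize_append_status(status: dict[str, str]) -> str:
--     if not status:
--         return ""
--     ok = sum(1 for v in status.values() if v == "ok")
--     no_db = [k for k, v in status.items() if v == "no_db"]
--     errs = [k for k, v in status.items() if v == "error"]
--     parts = [f"updated={ok}/{len(status)}"]
--     if no_db:
--         parts.append(f"missing_db={len(no_db)}")
--     if errs:
--         parts.append(f"errors={len(errs)}")
--     return " | ".join(parts)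
-- ===== SOURCE B (Python) =====
-- def summarize_append_status(status: dict[str, str]) -> str:
--     if not status:
--         return ""
--     ok = no_db = errs = 0
--     for v in status.values():
--         if v == "ok":
--             ok += 1
--         elif v == "no_db":
--             no_db += 1
--         elif v == "error":
--             errs += 1
--     out = f"updated={ok}/{len(status)}"
--     if no_db:
--         out += f" | missing_db={no_db}"
--     if errs:
--         out += f" | errors={errs}"
--     return out
-- ===== Notes on version B (the rewrite author's own statement) =====
-- stated objective: simpler
-- what changed: A single pass over the values with three integer accumulators replaces A's three separate filtered scans (an ok-sum and two key-list comprehensions), and the result string is built by direct conditional concatenation instead of a parts list joined at the end.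
import Mathlib
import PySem

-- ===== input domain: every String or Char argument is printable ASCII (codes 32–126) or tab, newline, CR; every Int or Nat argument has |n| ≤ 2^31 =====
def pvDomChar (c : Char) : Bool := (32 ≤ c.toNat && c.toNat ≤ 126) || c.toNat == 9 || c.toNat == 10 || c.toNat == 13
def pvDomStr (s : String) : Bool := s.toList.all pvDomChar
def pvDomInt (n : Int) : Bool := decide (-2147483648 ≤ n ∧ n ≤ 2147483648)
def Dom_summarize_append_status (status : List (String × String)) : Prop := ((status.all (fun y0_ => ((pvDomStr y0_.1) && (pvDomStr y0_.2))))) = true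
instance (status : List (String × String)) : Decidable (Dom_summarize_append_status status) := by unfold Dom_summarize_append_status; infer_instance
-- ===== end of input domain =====

-- B makes one pass over the values with three integer accumulators and builds the result by direct conditional concatenation, replacing A's three filtered scans and parts-list join (simpler; same cost).

-- ===== PORT A =====
def summarize_append_status (status : List (String × String)) : String :=
  if status = [] then "" else
    let ok : Int := (status.map Prod.snd).foldl (fun a v => if v = "ok" then a + 1 else a) 0
    let no_db := (status.filter (fun kv => kv.2 = "no_db")).map Prod.fst
    let errs := (status.filter (fun kv => kv.2 = "error")).map Prod.fst
    let parts := ["updated=" ++ PySem.Int.toStr ok ++ "/" ++ PySem.Int.toStr (status.length : Int)]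
    let parts := if no_db ≠ [] then parts ++ ["missing_db=" ++ PySem.Int.toStr (no_db.length : Int)] else parts
    let parts := if errs ≠ [] then parts ++ ["errors=" ++ PySem.Int.toStr (errs.length : Int)] else parts
    PySem.Str.join " | " parts

-- ===== PORT B =====
def summarize_append_status_alt (status : List (String × String)) : String :=
  if status = [] then "" else
    let t : Int × Int × Int := (status.map Prod.snd).foldl
      (fun t v =>
        if v = "ok" then (t.1 + 1, t.2.1, t.2.2)
        else if v = "no_db" then (t.1, t.2.1 + 1, t.2.2)
        else if v = "error" then (t.1, t.2.1, t.2.2 + 1)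
        else t) (0, 0, 0)
    let out := "updated=" ++ PySem.Int.toStr t.1 ++ "/" ++ PySem.Int.toStr (status.length : Int)
    let out := if t.2.1 ≠ 0 then out ++ " | missing_db=" ++ PySem.Int.toStr t.2.1 else out
    let out := if t.2.2 ≠ 0 then out ++ " | errors=" ++ PySem.Int.toStr t.2.2 else out
    out

-- ===== PRECONDITION & SPEC =====
def Spec_summarize_append_status (status : List (String × String)) (out : String) : Prop := out = summarize_append_status_alt status
instance (status : List (String × String)) (out : String) : Decidable (Spec_summarize_append_status status out) := by unfold Spec_summarize_append_status; infer_instance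

-- ===== CLAIM =====
def Claim_equal_summarize_append_status : Prop := ∀ (status : List (String × String)), Dom_summarize_append_status status → Spec_summarize_append_status status (summarize_append_status status)

-- ===== LEMMAS AND PROOFS =====

-- B's single pass computes the three counts at once.
theorem tally_gen (l : List String) (a b c : Int) :
    l.foldl (fun (t : Int × Int × Int) v =>
        if v = "ok" then (t.1 + 1, t.2.1, t.2.2)
        else if v = "no_db" then (t.1, t.2.1 + 1, t.2.2)
        else if v = "error" then (t.1, t.2.1, t.2.2 + 1)
        else t) (a, b, c)
      = (a + (l.count "ok" : Int), b + (l.count "no_db" : Int), c + (l.count "error" : Int)) := by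
  induction l generalizing a b c with
  | nil => simp
  | cons x xs ih =>
    by_cases h1 : x = "ok"
    · simp [h1, ih]; omega
    · by_cases h2 : x = "no_db"
      · simp [h2, ih]; omega
      · by_cases h3 : x = "error"
        · simp [h3, ih]; omega
        · simp [h1, h2, h3, ih]

theorem tally (l : List String) :
    l.foldl (fun (t : Int × Int × Int) v =>
        if v = "ok" then (t.1 + 1, t.2.1, t.2.2)
        else if v = "no_db" then (t.1, t.2.1 + 1, t.2.2)
        else if v = "error" then (t.1, t.2.1, t.2.2 + 1)
        else t) (0, 0, 0)
      = ((l.count "ok" : Int), (l.count "no_db" : Int), (l.count "error" : Int)) := by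
  simpa using tally_gen l 0 0 0

-- A's filtered-key-list length for value v is the count of v among the values.
theorem filter_len (status : List (String × String)) (v : String) :
    ((status.filter (fun kv => kv.2 = v)).map Prod.fst).length = (status.map Prod.snd).count v := by
  simp only [List.count_eq_countP, List.countP_map, List.length_map,
    ← List.countP_eq_length_filter]
  apply List.countP_congr
  intro kv _
  simp [Function.comp]

-- A's ok-sum is the count of "ok" among the values.
theorem ok_sum_gen (l : List String) (a : Int) :
    (l.foldl (fun a v => if v = "ok" then a + 1 else a) a) = a + (l.count "ok" : Int) := by
  induction l generalizing a with
  | nil => simp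
  | cons x xs ih =>
    by_cases hx : x = "ok"
    · simp [hx, ih]; ring
    · simp [hx, ih]

-- " | ".join on one, two and three parts, as plain string concatenation.
theorem join1 (sep a : String) : PySem.Str.join sep [a] = a := by
  simp [PySem.Str.join, PySem.Chars.join_singleton]

theorem join2 (sep a b : String) : PySem.Str.join sep [a, b] = a ++ sep ++ b := by
  have h : (PySem.Str.join sep [a, b]).toList = (a ++ sep ++ b).toList := by
    simp [PySem.Str.join, PySem.Chars.join_cons_cons, PySem.Chars.join_singleton]
  exact String.toList_inj.mp h

theorem join3 (sep a b c : String) : PySem.Str.join sep [a, b, c] = a ++ sep ++ b ++ sep ++ c := by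
  have h : (PySem.Str.join sep [a, b, c]).toList = (a ++ sep ++ b ++ sep ++ c).toList := by
    simp [PySem.Str.join, PySem.Chars.join_cons_cons, PySem.Chars.join_singleton]
  exact String.toList_inj.mp h

-- B's fused literals split into A's separator plus part label.
theorem lit_missing : " | missing_db=" = " | " ++ "missing_db=" := by rfl

theorem lit_errors : " | errors=" = " | " ++ "errors=" := by rfl

theorem summarize_eq (status : List (String × String)) :
    summarize_append_status status = summarize_append_status_alt status := by
  unfold summarize_append_status summarize_append_status_alt
  by_cases h : status = []
  · simp [h]
  · simp only [h, if_false, tally]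
    have hok : ((status.map Prod.snd).foldl (fun a v => if v = "ok" then a + 1 else a) (0 : Int))
        = ((status.map Prod.snd).count "ok" : Int) := by simpa using ok_sum_gen (status.map Prod.snd) 0
    have h1 := filter_len status "no_db"
    have h2 := filter_len status "error"
    have e1 : (((status.filter (fun kv => kv.2 = "no_db")).map Prod.fst) ≠ []) ↔ (((status.map Prod.snd).count "no_db" : Int) ≠ 0) := by
      rw [← List.length_pos_iff_ne_nil, h1]; omega
    have e2 : (((status.filter (fun kv => kv.2 = "error")).map Prod.fst) ≠ []) ↔ (((status.map Prod.snd).count "error" : Int) ≠ 0) := by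
      rw [← List.length_pos_iff_ne_nil, h2]; omega
    rw [hok, h1, h2]
    by_cases c1 : (((status.map Prod.snd).count "no_db" : Int) ≠ 0) <;>
    by_cases c2 : (((status.map Prod.snd).count "error" : Int) ≠ 0) <;>
    simp only [c1, c2, e1, e2, if_pos, if_neg, not_false_iff, ne_eq,
      Int.natCast_eq_zero] <;>
    simp only [join1, join2, join3, lit_missing, lit_errors, String.append_assoc] <;>
    simp [c1, c2, e1, e2, join1, join2, join3, lit_missing, lit_errors, String.append_assoc]

-- ===== VERDICT =====
theorem summarize_append_status_spec : Claim_equal_summarize_append_status := by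
  intro status _
  unfold Spec_summarize_append_status
  exact summarize_eq status
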